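-- pv_equiv track=rewrite | github.com/Maxwell-Yang-2001/maxwell-yang-leetcode | 858-mirror-reflection/858-mirror-reflection.py | mirrorReflection
-- ===== SOURCE A (Python) =====
-- def mirrorReflection(p: int, q: int) -> int:
--     # math problem: p / q oddity 3 cases:
--     # odd / odd: corner 1
--     # odd / even: corner 0
--     # even / odd: corner 2
--
--     while p % 2 == 0 and q % 2 == 0:
--         p //= 2
--         q //= 2
--
--     if p % 2 == 1:
--         if q % 2 == 1:
--             return 1
--         else:
--             return 0
--     else:
--         return 2
-- ===== SOURCE B (Python) =====
-- def mirrorReflection(p: int, q: int) -> int: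
--     # Reduce by the full gcd (Euclid's algorithm), then read the parities
--     # of the coprime quotients: odd/odd -> 1, odd/even -> 0, even/odd -> 2.
--     a, b = abs(p), abs(q)
--     while b:
--         a, b = b, a % b
--     pr = (p // a) % 2
--     qr = (q // a) % 2
--     if pr and qr:
--         return 1
--     if pr:
--         return 0
--     return 2
-- ===== Notes on version B (the rewrite author's own statement) =====
-- stated objective: alternative
-- what changed: Replaces the iterative stripping of common factors of 2 with a full Euclidean-gcd reduction followed by parity checks on the coprime quotients (parity is preserved because the gcd's odd part is odd).
-- outside the precondition, e.g. on mirrorReflection(0, 0): A does not finish within the time limit, B raises ZeroDivisionError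
import Mathlib
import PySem

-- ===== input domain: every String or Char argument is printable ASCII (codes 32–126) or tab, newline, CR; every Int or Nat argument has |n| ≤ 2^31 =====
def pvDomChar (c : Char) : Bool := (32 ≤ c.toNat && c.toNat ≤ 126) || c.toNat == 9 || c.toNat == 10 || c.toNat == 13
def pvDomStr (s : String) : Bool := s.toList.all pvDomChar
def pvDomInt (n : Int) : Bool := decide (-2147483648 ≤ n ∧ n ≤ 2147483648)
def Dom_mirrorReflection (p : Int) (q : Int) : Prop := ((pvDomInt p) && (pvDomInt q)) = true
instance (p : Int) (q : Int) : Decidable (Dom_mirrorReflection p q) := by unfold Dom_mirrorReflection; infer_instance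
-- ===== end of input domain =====

-- B replaces A's while-loop stripping common factors of 2 by a full Euclidean-gcd
-- reduction followed by parity checks on the coprime quotients (objective: alternative).

-- ===== PORT A =====
-- A's while loop; the fuel argument only makes the recursion total in Lean
-- (|p|+|q|+1 steps always suffice; Python A loops forever on (0,0), which Pre_ excludes)
def stripTwosFuel : Nat → Int → Int → Int × Int
  | 0, p, q => (p, q)
  | n + 1, p, q =>
    if PySem.Int.mod p 2 = 0 ∧ PySem.Int.mod q 2 = 0 then
      stripTwosFuel n (PySem.Int.floordiv p 2) (PySem.Int.floordiv q 2)
    else (p, q)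

def mirrorReflection (p : Int) (q : Int) : Int :=
  let r := stripTwosFuel (p.natAbs + q.natAbs + 1) p q
  if PySem.Int.mod r.1 2 = 1 then
    if PySem.Int.mod r.2 2 = 1 then 1 else 0
  else 2

-- ===== PORT B =====
-- B's Euclid while loop; the fuel argument only makes the recursion total in Lean
-- (|b|+1 steps always suffice since |a % b| < |b|)
def gcdFuel : Nat → Int → Int → Int
  | 0, a, _ => a
  | n + 1, a, b => if b ≠ 0 then gcdFuel n b (PySem.Int.mod a b) else a

def mirrorReflection_alt (p : Int) (q : Int) : Int :=
  let a := gcdFuel (q.natAbs + 1) |p| |q|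
  let pr := PySem.Int.mod (PySem.Int.floordiv p a) 2
  let qr := PySem.Int.mod (PySem.Int.floordiv q a) 2
  if pr ≠ 0 ∧ qr ≠ 0 then 1
  else if pr ≠ 0 then 0
  else 2

-- ===== PRECONDITION & SPEC =====
-- Pre_ excludes only (0,0), where Python A loops forever and Python B raises ZeroDivisionError.
def Pre_mirrorReflection (p : Int) (q : Int) : Prop := ¬ (p = 0 ∧ q = 0)
instance (p : Int) (q : Int) : Decidable (Pre_mirrorReflection p q) := by unfold Pre_mirrorReflection; infer_instance
def pvWitness_mirrorReflection : Int × Int := (3, 2)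

def Spec_mirrorReflection (p : Int) (q : Int) (out : Int) : Prop := out = mirrorReflection_alt p q
instance (p : Int) (q : Int) (out : Int) : Decidable (Spec_mirrorReflection p q out) := by unfold Spec_mirrorReflection; infer_instance

-- ===== CLAIM (what is proved, stated in full; the proofs are below) =====
def Claim_equal_mirrorReflection : Prop := ∀ (p : Int) (q : Int), Dom_mirrorReflection p q → Pre_mirrorReflection p q → Spec_mirrorReflection p q (mirrorReflection p q)

-- ===== LEMMAS AND PROOFS =====

-- unfolding of mirrorReflection_alt's lets
theorem alt_def (p q : Int) : mirrorReflection_alt p q =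
    (if PySem.Int.mod (PySem.Int.floordiv p (gcdFuel (q.natAbs + 1) |p| |q|)) 2 ≠ 0 ∧
        PySem.Int.mod (PySem.Int.floordiv q (gcdFuel (q.natAbs + 1) |p| |q|)) 2 ≠ 0 then 1
     else if PySem.Int.mod (PySem.Int.floordiv p (gcdFuel (q.natAbs + 1) |p| |q|)) 2 ≠ 0 then 0 else 2) := rfl

-- with enough fuel, gcdFuel on nonnegative casts computes Nat.gcd
theorem gcdFuel_natCast (f : Nat) : ∀ (n m : Nat), n < f → gcdFuel f (m : Int) (n : Int) = ((Nat.gcd m n : Nat) : Int) := by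
  induction f with
  | zero => intro n m h; omega
  | succ f ih =>
    intro n m h
    show (if ((n : Int) ≠ 0) then gcdFuel f (n : Int) (PySem.Int.mod (m : Int) (n : Int)) else (m : Int)) = _
    by_cases hn : (n : Int) = 0
    · have : n = 0 := by exact_mod_cast hn
      subst this; simp
    · have hn' : n ≠ 0 := by exact_mod_cast hn
      rw [if_pos hn, PySem.Int.mod_natCast]
      have hlt : m % n < f := by
        have := Nat.mod_lt m (Nat.pos_of_ne_zero hn')
        omega
      rw [ih (m % n) n hlt]
      rw [Nat.gcd_comm n (m % n), ← Nat.gcd_rec, Nat.gcd_comm]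

theorem gcdFuel_abs (p q : Int) : gcdFuel (q.natAbs + 1) |p| |q| = ((Int.gcd p q : Nat) : Int) := by
  rw [Int.abs_eq_natAbs p, Int.abs_eq_natAbs q, gcdFuel_natCast (q.natAbs + 1) q.natAbs p.natAbs (by omega)]
  rfl

theorem mod_two_cases (x : Int) : PySem.Int.mod x 2 = 0 ∨ PySem.Int.mod x 2 = 1 := by
  have h1 := PySem.Int.mod_nonneg x (show (0:Int) < 2 by norm_num)
  have h2 := PySem.Int.mod_lt x (show (0:Int) < 2 by norm_num)
  omega

-- dividing by an odd divisor preserves parity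
theorem mod_two_ediv_odd (x g : Int) (hg : 0 < g) (hodd : g % 2 = 1) (hdvd : g ∣ x) :
    PySem.Int.mod (PySem.Int.floordiv x g) 2 = PySem.Int.mod x 2 := by
  obtain ⟨k, rfl⟩ := hdvd
  rw [PySem.Int.floordiv_eq_ediv_of_pos hg, Int.mul_ediv_cancel_left k (by omega),
      PySem.Int.mod_eq_emod_of_pos (by norm_num), PySem.Int.mod_eq_emod_of_pos (by norm_num),
      Int.mul_emod, hodd, one_mul, Int.emod_emod_of_dvd _ (by norm_num)]

theorem gcd_pos_of_ne (p q : Int) (hz : ¬ (p = 0 ∧ q = 0)) : 0 < ((Int.gcd p q : Nat) : Int) := by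
  have : Int.gcd p q ≠ 0 := by
    intro h
    exact hz ⟨Int.natAbs_eq_zero.mp (Nat.eq_zero_of_gcd_eq_zero_left h),
              Int.natAbs_eq_zero.mp (Nat.eq_zero_of_gcd_eq_zero_right h)⟩
  exact_mod_cast Nat.pos_of_ne_zero this

-- base case: when p, q are not both even, B already returns A's branch value
theorem alt_base (p q : Int) (hz : ¬ (p = 0 ∧ q = 0))
    (hne : ¬ (PySem.Int.mod p 2 = 0 ∧ PySem.Int.mod q 2 = 0)) :
    mirrorReflection_alt p q =
      (if PySem.Int.mod p 2 = 1 then if PySem.Int.mod q 2 = 1 then 1 else 0 else 2) := by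
  have hgpos : 0 < ((Int.gcd p q : Nat) : Int) := gcd_pos_of_ne p q hz
  have hodd : ((Int.gcd p q : Nat) : Int) % 2 = 1 := by
    rcases Int.emod_two_eq_zero_or_one ((Int.gcd p q : Nat) : Int) with h | h
    · exfalso
      have h2 : (2 : Int) ∣ ((Int.gcd p q : Nat) : Int) := Int.dvd_of_emod_eq_zero h
      have hp2 : (2 : Int) ∣ p := h2.trans (Int.gcd_dvd_left p q)
      have hq2 : (2 : Int) ∣ q := h2.trans (Int.gcd_dvd_right p q)
      exact hne ⟨(PySem.Int.mod_eq_zero_iff_dvd p 2).mpr hp2,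
                 (PySem.Int.mod_eq_zero_iff_dvd q 2).mpr hq2⟩
    · exact h
  rw [alt_def, gcdFuel_abs,
      mod_two_ediv_odd p _ hgpos hodd (Int.gcd_dvd_left p q),
      mod_two_ediv_odd q _ hgpos hodd (Int.gcd_dvd_right p q)]
  rcases mod_two_cases p with hp | hp <;> rcases mod_two_cases q with hq | hq <;>
    rw [hp, hq] <;> norm_num

-- halving both arguments does not change B's value
theorem alt_halve (a b : Int) (hz : ¬ (a = 0 ∧ b = 0)) :
    mirrorReflection_alt (2 * a) (2 * b) = mirrorReflection_alt a b := by
  have hgpos : 0 < ((Int.gcd a b : Nat) : Int) := gcd_pos_of_ne a b hz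
  have hgcd : ((Int.gcd (2*a) (2*b) : Nat) : Int) = 2 * ((Int.gcd a b : Nat) : Int) := by
    unfold Int.gcd
    push_cast [Int.natAbs_mul]
    rw [Nat.gcd_mul_left]
    push_cast
    ring
  rw [alt_def, alt_def, gcdFuel_abs, gcdFuel_abs, hgcd,
      PySem.Int.floordiv_eq_ediv_of_pos (by omega), PySem.Int.floordiv_eq_ediv_of_pos (by omega),
      PySem.Int.floordiv_eq_ediv_of_pos hgpos, PySem.Int.floordiv_eq_ediv_of_pos hgpos,
      Int.mul_ediv_mul_of_pos a _ (by norm_num), Int.mul_ediv_mul_of_pos b _ (by norm_num)]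

-- the core induction, following A's loop
theorem strip_alt (n : Nat) : ∀ (p q : Int), p.natAbs + q.natAbs < n → ¬ (p = 0 ∧ q = 0) →
    (if PySem.Int.mod (stripTwosFuel n p q).1 2 = 1 then
       if PySem.Int.mod (stripTwosFuel n p q).2 2 = 1 then (1:Int) else 0
     else 2) = mirrorReflection_alt p q := by
  induction n with
  | zero => intro p q h; omega
  | succ n ih =>
    intro p q hn hz
    have hstep : stripTwosFuel (n + 1) p q =
        (if PySem.Int.mod p 2 = 0 ∧ PySem.Int.mod q 2 = 0 then
           stripTwosFuel n (PySem.Int.floordiv p 2) (PySem.Int.floordiv q 2) else (p, q)) := rfl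
    rw [hstep]
    by_cases h : PySem.Int.mod p 2 = 0 ∧ PySem.Int.mod q 2 = 0
    · rw [if_pos h]
      obtain ⟨hp, hq⟩ := h
      rw [PySem.Int.mod_eq_zero_iff_dvd] at hp hq
      obtain ⟨a, rfl⟩ := hp
      obtain ⟨b, rfl⟩ := hq
      have ha : PySem.Int.floordiv (2 * a) 2 = a := by
        rw [PySem.Int.floordiv_eq_ediv_of_pos (by norm_num)]
        exact Int.mul_ediv_cancel_left a (by norm_num)
      have hb : PySem.Int.floordiv (2 * b) 2 = b := by
        rw [PySem.Int.floordiv_eq_ediv_of_pos (by norm_num)]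
        exact Int.mul_ediv_cancel_left b (by norm_num)
      rw [ha, hb]
      have hz' : ¬ (a = 0 ∧ b = 0) := by
        rintro ⟨rfl, rfl⟩; exact hz ⟨by ring, by ring⟩
      have hlt : a.natAbs + b.natAbs < n := by
        have h2a : (2 * a).natAbs = 2 * a.natAbs := by simp [Int.natAbs_mul]
        have h2b : (2 * b).natAbs = 2 * b.natAbs := by simp [Int.natAbs_mul]
        rcases not_and_or.mp hz' with h | h <;>
          (have : a.natAbs ≠ 0 ∨ b.natAbs ≠ 0 := by
             first
               | exact Or.inl (fun hh => h (Int.natAbs_eq_zero.mp hh))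
               | exact Or.inr (fun hh => h (Int.natAbs_eq_zero.mp hh))) <;>
          omega
      rw [ih a b hlt hz', alt_halve a b hz']
    · rw [if_neg h]
      exact (alt_base p q hz h).symm

-- ===== VERDICT (by name: the statement is the Claim_ definition above) =====
theorem mirrorReflection_spec : Claim_equal_mirrorReflection := by
  intro p q _ hpre
  unfold Spec_mirrorReflection mirrorReflection
  exact strip_alt (p.natAbs + q.natAbs + 1) p q (by omega) hpre
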